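-- pv_equiv track=rewrite | github.com/yannikw0/osm_put_stop_extractor | main.py | check_service_from_element_tags
-- ===== SOURCE A (Python) =====
-- def check_service_from_element_tags(tags):
--     # tag_lookup = {
--     #     'train': 'train',
--     #     'subway': 'subway',
--     #     'light_rail': 'light_rail',
--     #     'tram': 'tram',
--     #     'railway': 'railway_platform',
--     #     'bus': 'bus',
--     #     'highway': 'highway_platform'
--     # }
--     tag_lookup = {
--         # tag: [general_type, specific_type]
--         'train': ['rail', 'train'],
--         'subway': ['rail', 'subway'],
--         'light_rail': ['rail', 'light_rail'],
--         'tram': ['rail', 'tram'],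
--         'bus': ['bus', 'bus']
--     }
--     # Vsys-Check
--     for tag, result in tag_lookup.items():
--         if tags.get(tag) == 'yes':
--             return result[0], result[1]
--     # bus_stop check
--     if tags.get('highway') == 'bus_stop':
--         return 'bus', 'bus'
--     # platform check
--     for tag, result in {'railway': ['rail', 'railway_platform'], 'highway': ['bus', 'highway_platform']}.items():
--         if tags.get(tag) == 'platform':
--             return result[0], result[1]
--
--     return 'unknown', 'unknown'
-- ===== SOURCE B (Python) =====
-- # Single pass over the tag items with a min-priority accumulator: each (key, value)
-- # item is looked up in a rule map keyed by the pair, and the lowest-priority hit wins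
-- # (priorities encode A's precedence). A instead probes the dict once per rule.
-- _RULE = {
--     ('train', 'yes'): (0, 'rail', 'train'),
--     ('subway', 'yes'): (1, 'rail', 'subway'),
--     ('light_rail', 'yes'): (2, 'rail', 'light_rail'),
--     ('tram', 'yes'): (3, 'rail', 'tram'),
--     ('bus', 'yes'): (4, 'bus', 'bus'),
--     ('highway', 'bus_stop'): (5, 'bus', 'bus'),
--     ('railway', 'platform'): (6, 'rail', 'railway_platform'),
--     ('highway', 'platform'): (7, 'bus', 'highway_platform'),
-- }
--
-- def check_service_from_element_tags(tags):
--     best = None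
--     for item in tags.items():
--         hit = _RULE.get(item)
--         if hit is not None:
--             if best is None or hit[0] < best[0]:
--                 best = hit
--     if best is None:
--         return 'unknown', 'unknown'
--     return best[1], best[2]
-- ===== Notes on version B (the rewrite author's own statement) =====
-- stated objective: alternative
-- what changed: Instead of A's ordered probes into the tag dict (a yes-loop, a bus_stop check, a platform-loop), B makes one pass over the tag items themselves, looking each (key,value) pair up in a rule map and keeping the hit of minimal priority, which encodes A's precedence.
import Mathlib
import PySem

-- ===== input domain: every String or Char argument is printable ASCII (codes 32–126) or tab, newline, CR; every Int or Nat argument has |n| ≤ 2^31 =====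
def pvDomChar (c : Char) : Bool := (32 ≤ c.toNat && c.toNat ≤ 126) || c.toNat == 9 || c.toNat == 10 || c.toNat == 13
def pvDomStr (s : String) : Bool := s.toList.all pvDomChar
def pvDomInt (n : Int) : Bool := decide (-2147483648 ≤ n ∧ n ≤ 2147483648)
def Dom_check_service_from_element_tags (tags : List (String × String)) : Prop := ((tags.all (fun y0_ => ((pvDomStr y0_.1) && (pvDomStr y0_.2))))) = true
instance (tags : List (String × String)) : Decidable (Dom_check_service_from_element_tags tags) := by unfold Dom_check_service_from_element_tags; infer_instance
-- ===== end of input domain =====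

-- B replaces A's ordered probes into the tag dict by a single pass over the tag items,
-- keeping the rule hit of minimal priority (alternative decomposition, same cost class).

-- ===== PORT A =====
-- tags.get(k): first-match lookup on the association list (a Python dict has unique keys)
def pvTagGet (tags : List (String × String)) (k : String) : Option String :=
  (PySem.Dict.mk tags).get? k

def check_service_from_element_tags (tags : List (String × String)) : String × String :=
  -- Vsys-Check: loop over tag_lookup.items() in insertion order
  if pvTagGet tags "train" = some "yes" then ("rail", "train")
  else if pvTagGet tags "subway" = some "yes" then ("rail", "subway")
  else if pvTagGet tags "light_rail" = some "yes" then ("rail", "light_rail")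
  else if pvTagGet tags "tram" = some "yes" then ("rail", "tram")
  else if pvTagGet tags "bus" = some "yes" then ("bus", "bus")
  -- bus_stop check
  else if pvTagGet tags "highway" = some "bus_stop" then ("bus", "bus")
  -- platform check: loop over the two-entry dict in insertion order
  else if pvTagGet tags "railway" = some "platform" then ("rail", "railway_platform")
  else if pvTagGet tags "highway" = some "platform" then ("bus", "highway_platform")
  else ("unknown", "unknown")

-- ===== PORT B =====
-- _RULE: the rule map of Source B, keyed by the (key, value) pair
def pvRuleDict : PySem.Dict (String × String) (Nat × String × String) :=
  PySem.Dict.mk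
    [(("train", "yes"), (0, "rail", "train")),
     (("subway", "yes"), (1, "rail", "subway")),
     (("light_rail", "yes"), (2, "rail", "light_rail")),
     (("tram", "yes"), (3, "rail", "tram")),
     (("bus", "yes"), (4, "bus", "bus")),
     (("highway", "bus_stop"), (5, "bus", "bus")),
     (("railway", "platform"), (6, "rail", "railway_platform")),
     (("highway", "platform"), (7, "bus", "highway_platform"))]

-- _RULE.get(item)
def pvRuleGet (item : String × String) : Option (Nat × String × String) :=
  pvRuleDict.get? item

-- tags.items(): on the assoc-list representation of the dict (lookup = first match) the
-- items are the pairs at the FIRST occurrence of each key, in order; `seen` collects the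
-- keys already emitted.
def pvItemsGo (L : List (String × String)) (seen : List String) : List (String × String) :=
  match L with
  | [] => []
  | (k, v) :: rest =>
    if k ∈ seen then pvItemsGo rest seen else (k, v) :: pvItemsGo rest (k :: seen)

def pvFirstItems (tags : List (String × String)) : List (String × String) :=
  pvItemsGo tags []

-- the loop body of Source B: keep the hit with the smaller priority (first wins ties)
def pvStep (best : Option (Nat × String × String)) (item : String × String) :
    Option (Nat × String × String) :=
  match pvRuleGet item with
  | none => best
  | some h =>
    match best with
    | none => some h
    | some b => if h.1 < b.1 then some h else some b

def check_service_from_element_tags_alt (tags : List (String × String)) : String × String :=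
  match (pvFirstItems tags).foldl pvStep none with
  | some h => (h.2.1, h.2.2)
  | none => ("unknown", "unknown")

-- ===== PRECONDITION & SPEC =====
def Spec_check_service_from_element_tags (tags : List (String × String)) (out : String × String) : Prop := out = check_service_from_element_tags_alt tags
instance (tags : List (String × String)) (out : String × String) : Decidable (Spec_check_service_from_element_tags tags out) := by unfold Spec_check_service_from_element_tags; infer_instance

-- ===== CLAIM (what is proved, stated in full; the proofs are below) =====
def Claim_equal_check_service_from_element_tags : Prop := ∀ (tags : List (String × String)), Dom_check_service_from_element_tags tags → Spec_check_service_from_element_tags tags (check_service_from_element_tags tags)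

-- ===== LEMMAS AND PROOFS =====

lemma mem_itemsGo (L : List (String × String)) :
    ∀ (seen : List String) (k v : String),
      (k, v) ∈ pvItemsGo L seen ↔ k ∉ seen ∧ pvTagGet L k = some v := by
  induction L with
  | nil =>
    intro seen k v
    simp [pvItemsGo, pvTagGet, PySem.Dict.get?]
  | cons x rest ih =>
    obtain ⟨a, b⟩ := x
    intro seen k v
    unfold pvTagGet
    rw [PySem.Dict.get?_mk_cons]
    by_cases hak : a = k
    · subst hak
      by_cases hs : a ∈ seen <;>
        simp [pvItemsGo, hs, ih, pvTagGet, Prod.ext_iff, eq_comm]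
    · have hbeq : (a == k) = false := by simpa using hak
      by_cases hs : a ∈ seen <;>
        simp [pvItemsGo, hs, hbeq, ih, pvTagGet, Prod.ext_iff, Ne.symm hak]

lemma mem_firstItems (L : List (String × String)) (k v : String) :
    (k, v) ∈ pvFirstItems L ↔ pvTagGet L k = some v := by
  rw [pvFirstItems, mem_itemsGo]
  simp

-- the combining function the fold iterates; pvStep acc item = pvCombine acc (pvRuleGet item)
def pvCombine (a b : Option (Nat × String × String)) : Option (Nat × String × String) :=
  match b with
  | none => a
  | some h =>
    match a with
    | none => some h
    | some x => if h.1 < x.1 then some h else some x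

lemma step_eq_combine (acc : Option (Nat × String × String)) (item : String × String) :
    pvStep acc item = pvCombine acc (pvRuleGet item) := by
  unfold pvStep pvCombine
  cases pvRuleGet item <;> cases acc <;> rfl

lemma combine_assoc (a b c : Option (Nat × String × String)) :
    pvCombine (pvCombine a b) c = pvCombine a (pvCombine b c) := by
  cases a <;> cases b <;> cases c <;> simp only [pvCombine] <;> split_ifs <;>
    simp only [pvCombine] <;> split_ifs <;> first | rfl | (exfalso; omega)

lemma combine_none_left (b : Option (Nat × String × String)) : pvCombine none b = b := by
  cases b <;> rfl

lemma foldl_step_acc (L : List (String × String)) :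
    ∀ acc, L.foldl pvStep acc = pvCombine acc (L.foldl pvStep none) := by
  induction L with
  | nil => intro acc; rfl
  | cons x L ih =>
    intro acc
    simp only [List.foldl_cons]
    rw [ih (pvStep acc x), ih (pvStep none x), step_eq_combine, step_eq_combine,
      combine_none_left, combine_assoc]

lemma fold_none (L : List (String × String)) (h : L.foldl pvStep none = none) :
    ∀ item ∈ L, pvRuleGet item = none := by
  induction L with
  | nil => intro item h'; simp at h'
  | cons x L ih =>
    intro item hitem
    rw [List.foldl_cons, foldl_step_acc, step_eq_combine, combine_none_left] at h
    have hr : pvRuleGet x = none ∧ L.foldl pvStep none = none := by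
      rcases hx : pvRuleGet x with _ | a <;> rcases hF : L.foldl pvStep none with _ | f <;>
        rw [hx, hF] at h <;> simp only [pvCombine] at h <;>
        first | exact ⟨rfl, rfl⟩ | exact absurd h (by simp) | (split_ifs at h <;> simp at h)
    rcases List.mem_cons.1 hitem with rfl | hitem
    · exact hr.1
    · exact ih hr.2 item hitem

lemma fold_none_of (L : List (String × String)) (h : ∀ item ∈ L, pvRuleGet item = none) :
    L.foldl pvStep none = none := by
  induction L with
  | nil => rfl
  | cons x L ih =>
    rw [List.foldl_cons, step_eq_combine, h x List.mem_cons_self]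
    exact ih (fun item hi => h item (List.mem_cons_of_mem _ hi))

lemma fold_some (L : List (String × String)) (h : Nat × String × String)
    (hF : L.foldl pvStep none = some h) :
    ∃ item ∈ L, pvRuleGet item = some h := by
  induction L generalizing h with
  | nil => simp at hF
  | cons x L ih =>
    rw [List.foldl_cons, foldl_step_acc, step_eq_combine, combine_none_left] at hF
    rcases hx : pvRuleGet x with _ | a <;> rcases hL : L.foldl pvStep none with _ | f <;>
      rw [hx, hL] at hF <;> simp only [pvCombine] at hF
    · exact absurd hF (by simp)
    · obtain ⟨item, hm, hr⟩ := ih f hL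
      exact ⟨item, List.mem_cons_of_mem _ hm, by rw [hr, hF]⟩
    · exact ⟨x, List.mem_cons_self, by rw [hx, hF]⟩
    · split_ifs at hF
      · obtain ⟨item, hm, hr⟩ := ih f hL
        exact ⟨item, List.mem_cons_of_mem _ hm, by rw [hr, hF]⟩
      · exact ⟨x, List.mem_cons_self, by rw [hx, hF]⟩

lemma fold_min (L : List (String × String)) (h : Nat × String × String)
    (hF : L.foldl pvStep none = some h) :
    ∀ item ∈ L, ∀ h', pvRuleGet item = some h' → h.1 ≤ h'.1 := by
  induction L generalizing h with
  | nil => intro item hi; simp at hi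
  | cons x L ih =>
    intro item hitem h' hr
    rw [List.foldl_cons, foldl_step_acc, step_eq_combine, combine_none_left] at hF
    rcases List.mem_cons.1 hitem with rfl | hitem
    · -- item = x, so pvRuleGet item = some h'
      rcases hL : L.foldl pvStep none with _ | f <;> rw [hr, hL] at hF <;>
        simp only [pvCombine] at hF
      · obtain rfl := Option.some.inj hF
        exact le_refl _
      · split_ifs at hF with hc
        · obtain rfl := Option.some.inj hF
          omega
        · obtain rfl := Option.some.inj hF
          exact le_refl _
    · -- item ∈ L
      rcases hL : L.foldl pvStep none with _ | f
      · exact absurd (fold_none L hL item hitem) (by simp [hr])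
      · have hfle : f.1 ≤ h'.1 := ih f hL item hitem h' hr
        rcases hx : pvRuleGet x with _ | a <;> rw [hx, hL] at hF <;>
          simp only [pvCombine] at hF
        · obtain rfl := Option.some.inj hF
          exact hfle
        · split_ifs at hF with hc
          · obtain rfl := Option.some.inj hF
            omega
          · obtain rfl := Option.some.inj hF
            omega

-- pvRuleGet inverted: any hit comes from exactly one of the eight rules
lemma pvRuleGet_cases (p : String × String) (h : Nat × String × String)
    (hr : pvRuleGet p = some h) :
    (p = ("train", "yes") ∧ h = (0, "rail", "train")) ∨
    (p = ("subway", "yes") ∧ h = (1, "rail", "subway")) ∨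
    (p = ("light_rail", "yes") ∧ h = (2, "rail", "light_rail")) ∨
    (p = ("tram", "yes") ∧ h = (3, "rail", "tram")) ∨
    (p = ("bus", "yes") ∧ h = (4, "bus", "bus")) ∨
    (p = ("highway", "bus_stop") ∧ h = (5, "bus", "bus")) ∨
    (p = ("railway", "platform") ∧ h = (6, "rail", "railway_platform")) ∨
    (p = ("highway", "platform") ∧ h = (7, "bus", "highway_platform")) := by
  unfold pvRuleGet pvRuleDict at hr
  simp only [PySem.Dict.get?_mk_cons, beq_iff_eq] at hr
  split_ifs at hr <;> simp_all [PySem.Dict.get?, eq_comm]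

-- closed form of B's fold: exactly A's decision chain
lemma fold_eq (tags : List (String × String)) :
    (pvFirstItems tags).foldl pvStep none =
    if pvTagGet tags "train" = some "yes" then some (0, "rail", "train")
    else if pvTagGet tags "subway" = some "yes" then some (1, "rail", "subway")
    else if pvTagGet tags "light_rail" = some "yes" then some (2, "rail", "light_rail")
    else if pvTagGet tags "tram" = some "yes" then some (3, "rail", "tram")
    else if pvTagGet tags "bus" = some "yes" then some (4, "bus", "bus")
    else if pvTagGet tags "highway" = some "bus_stop" then some (5, "bus", "bus")
    else if pvTagGet tags "railway" = some "platform" then some (6, "rail", "railway_platform")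
    else if pvTagGet tags "highway" = some "platform" then some (7, "bus", "highway_platform")
    else none := by
  split_ifs with h0 h1 h2 h3 h4 h5 h6 h7
  case neg =>
    -- no rule matches: every item's lookup misses
    apply fold_none_of
    intro item hmem
    rcases hr : pvRuleGet item with _ | a
    · rfl
    · exfalso
      rcases pvRuleGet_cases item a hr with
        ⟨rfl, _⟩ | ⟨rfl, _⟩ | ⟨rfl, _⟩ | ⟨rfl, _⟩ | ⟨rfl, _⟩ | ⟨rfl, _⟩ | ⟨rfl, _⟩ | ⟨rfl, _⟩ <;>
        rw [mem_firstItems] at hmem <;> first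
        | exact h0 hmem | exact h1 hmem | exact h2 hmem | exact h3 hmem
        | exact h4 hmem | exact h5 hmem | exact h6 hmem | exact h7 hmem
  · -- rule 0: train=yes
    have hm := (mem_firstItems tags "train" "yes").2 h0
    have hri : pvRuleGet ("train", "yes") = some (0, "rail", "train") := by decide
    rcases hF : (pvFirstItems tags).foldl pvStep none with _ | h
    · exact absurd (fold_none _ hF _ hm) (by rw [hri]; simp)
    · have hle := fold_min _ h hF _ hm _ hri
      obtain ⟨item, hmem, hr⟩ := fold_some _ h hF
      rcases pvRuleGet_cases item h hr with
        ⟨rfl, rfl⟩ | ⟨rfl, rfl⟩ | ⟨rfl, rfl⟩ | ⟨rfl, rfl⟩ | ⟨rfl, rfl⟩ | ⟨rfl, rfl⟩ | ⟨rfl, rfl⟩ | ⟨rfl, rfl⟩ <;> first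
      | rfl
      | exact absurd hle (by decide)
  · -- rule 1: subway=yes
    have hm := (mem_firstItems tags "subway" "yes").2 h1
    have hri : pvRuleGet ("subway", "yes") = some (1, "rail", "subway") := by decide
    rcases hF : (pvFirstItems tags).foldl pvStep none with _ | h
    · exact absurd (fold_none _ hF _ hm) (by rw [hri]; simp)
    · have hle := fold_min _ h hF _ hm _ hri
      obtain ⟨item, hmem, hr⟩ := fold_some _ h hF
      rcases pvRuleGet_cases item h hr with
        ⟨rfl, rfl⟩ | ⟨rfl, rfl⟩ | ⟨rfl, rfl⟩ | ⟨rfl, rfl⟩ | ⟨rfl, rfl⟩ | ⟨rfl, rfl⟩ | ⟨rfl, rfl⟩ | ⟨rfl, rfl⟩ <;> first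
      | rfl
      | (rw [mem_firstItems] at hmem; first | exact absurd hmem h0)
      | exact absurd hle (by decide)
  · -- rule 2: light_rail=yes
    have hm := (mem_firstItems tags "light_rail" "yes").2 h2
    have hri : pvRuleGet ("light_rail", "yes") = some (2, "rail", "light_rail") := by decide
    rcases hF : (pvFirstItems tags).foldl pvStep none with _ | h
    · exact absurd (fold_none _ hF _ hm) (by rw [hri]; simp)
    · have hle := fold_min _ h hF _ hm _ hri
      obtain ⟨item, hmem, hr⟩ := fold_some _ h hF
      rcases pvRuleGet_cases item h hr with
        ⟨rfl, rfl⟩ | ⟨rfl, rfl⟩ | ⟨rfl, rfl⟩ | ⟨rfl, rfl⟩ | ⟨rfl, rfl⟩ | ⟨rfl, rfl⟩ | ⟨rfl, rfl⟩ | ⟨rfl, rfl⟩ <;> first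
      | rfl
      | (rw [mem_firstItems] at hmem; first | exact absurd hmem h0 | exact absurd hmem h1)
      | exact absurd hle (by decide)
  · -- rule 3: tram=yes
    have hm := (mem_firstItems tags "tram" "yes").2 h3
    have hri : pvRuleGet ("tram", "yes") = some (3, "rail", "tram") := by decide
    rcases hF : (pvFirstItems tags).foldl pvStep none with _ | h
    · exact absurd (fold_none _ hF _ hm) (by rw [hri]; simp)
    · have hle := fold_min _ h hF _ hm _ hri
      obtain ⟨item, hmem, hr⟩ := fold_some _ h hF
      rcases pvRuleGet_cases item h hr with
        ⟨rfl, rfl⟩ | ⟨rfl, rfl⟩ | ⟨rfl, rfl⟩ | ⟨rfl, rfl⟩ | ⟨rfl, rfl⟩ | ⟨rfl, rfl⟩ | ⟨rfl, rfl⟩ | ⟨rfl, rfl⟩ <;> first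
      | rfl
      | (rw [mem_firstItems] at hmem; first | exact absurd hmem h0 | exact absurd hmem h1 | exact absurd hmem h2)
      | exact absurd hle (by decide)
  · -- rule 4: bus=yes
    have hm := (mem_firstItems tags "bus" "yes").2 h4
    have hri : pvRuleGet ("bus", "yes") = some (4, "bus", "bus") := by decide
    rcases hF : (pvFirstItems tags).foldl pvStep none with _ | h
    · exact absurd (fold_none _ hF _ hm) (by rw [hri]; simp)
    · have hle := fold_min _ h hF _ hm _ hri
      obtain ⟨item, hmem, hr⟩ := fold_some _ h hF
      rcases pvRuleGet_cases item h hr with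
        ⟨rfl, rfl⟩ | ⟨rfl, rfl⟩ | ⟨rfl, rfl⟩ | ⟨rfl, rfl⟩ | ⟨rfl, rfl⟩ | ⟨rfl, rfl⟩ | ⟨rfl, rfl⟩ | ⟨rfl, rfl⟩ <;> first
      | rfl
      | (rw [mem_firstItems] at hmem; first | exact absurd hmem h0 | exact absurd hmem h1 | exact absurd hmem h2 | exact absurd hmem h3)
      | exact absurd hle (by decide)
  · -- rule 5: highway=bus_stop
    have hm := (mem_firstItems tags "highway" "bus_stop").2 h5
    have hri : pvRuleGet ("highway", "bus_stop") = some (5, "bus", "bus") := by decide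
    rcases hF : (pvFirstItems tags).foldl pvStep none with _ | h
    · exact absurd (fold_none _ hF _ hm) (by rw [hri]; simp)
    · have hle := fold_min _ h hF _ hm _ hri
      obtain ⟨item, hmem, hr⟩ := fold_some _ h hF
      rcases pvRuleGet_cases item h hr with
        ⟨rfl, rfl⟩ | ⟨rfl, rfl⟩ | ⟨rfl, rfl⟩ | ⟨rfl, rfl⟩ | ⟨rfl, rfl⟩ | ⟨rfl, rfl⟩ | ⟨rfl, rfl⟩ | ⟨rfl, rfl⟩ <;> first
      | rfl
      | (rw [mem_firstItems] at hmem; first | exact absurd hmem h0 | exact absurd hmem h1 | exact absurd hmem h2 | exact absurd hmem h3 | exact absurd hmem h4)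
      | exact absurd hle (by decide)
  · -- rule 6: railway=platform
    have hm := (mem_firstItems tags "railway" "platform").2 h6
    have hri : pvRuleGet ("railway", "platform") = some (6, "rail", "railway_platform") := by decide
    rcases hF : (pvFirstItems tags).foldl pvStep none with _ | h
    · exact absurd (fold_none _ hF _ hm) (by rw [hri]; simp)
    · have hle := fold_min _ h hF _ hm _ hri
      obtain ⟨item, hmem, hr⟩ := fold_some _ h hF
      rcases pvRuleGet_cases item h hr with
        ⟨rfl, rfl⟩ | ⟨rfl, rfl⟩ | ⟨rfl, rfl⟩ | ⟨rfl, rfl⟩ | ⟨rfl, rfl⟩ | ⟨rfl, rfl⟩ | ⟨rfl, rfl⟩ | ⟨rfl, rfl⟩ <;> first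
      | rfl
      | (rw [mem_firstItems] at hmem; first | exact absurd hmem h0 | exact absurd hmem h1 | exact absurd hmem h2 | exact absurd hmem h3 | exact absurd hmem h4 | exact absurd hmem h5)
      | exact absurd hle (by decide)
  · -- rule 7: highway=platform
    have hm := (mem_firstItems tags "highway" "platform").2 h7
    have hri : pvRuleGet ("highway", "platform") = some (7, "bus", "highway_platform") := by decide
    rcases hF : (pvFirstItems tags).foldl pvStep none with _ | h
    · exact absurd (fold_none _ hF _ hm) (by rw [hri]; simp)
    · have hle := fold_min _ h hF _ hm _ hri
      obtain ⟨item, hmem, hr⟩ := fold_some _ h hF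
      rcases pvRuleGet_cases item h hr with
        ⟨rfl, rfl⟩ | ⟨rfl, rfl⟩ | ⟨rfl, rfl⟩ | ⟨rfl, rfl⟩ | ⟨rfl, rfl⟩ | ⟨rfl, rfl⟩ | ⟨rfl, rfl⟩ | ⟨rfl, rfl⟩ <;> first
      | rfl
      | (rw [mem_firstItems] at hmem; first | exact absurd hmem h0 | exact absurd hmem h1 | exact absurd hmem h2 | exact absurd hmem h3 | exact absurd hmem h4 | exact absurd hmem h5 | exact absurd hmem h6)
      | exact absurd hle (by decide)

-- ===== VERDICT (by name: the statement is the Claim_ definition above) =====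
theorem check_service_from_element_tags_spec : Claim_equal_check_service_from_element_tags := by
  intro tags _
  unfold Spec_check_service_from_element_tags check_service_from_element_tags
    check_service_from_element_tags_alt
  rw [fold_eq]
  split_ifs <;> rfl
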